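-- pv_equiv track=rewrite | github.com/pypi-data/pypi-mirror-67 | packages/jouets/jouets-0.3.0-py3-none-any.whl/jouets/verger/__init__.py | panier_max
-- ===== SOURCE A (Python) =====
-- def panier_max(arbres):
--     """Choisir l'arbre le moins vide (contenant le plus de fruits)."""
--     if len(arbres) == 1:
--         return [arbres[0] - 2]
--     if arbres[-1] == 1 or arbres[-1] == arbres[-2]:
--         return sorted(
--             (
--                 fruits
--                 for fruits in (list(arbres[:-2]) + [arbres[-2] - 1] + [arbres[-1] - 1])
--                 if fruits
--             )
--         )
--     return sorted(
--         (fruits for fruits in (list(arbres[:-1]) + [arbres[-1] - 2]) if fruits)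
--     )
-- ===== SOURCE B (Python) =====
-- def _insort(out, f):
--     """Insert f into the already-sorted list out, after any equal elements."""
--     i = 0
--     while i < len(out) and out[i] <= f:
--         i += 1
--     out.insert(i, f)
--
--
-- def panier_max(arbres):
--     """Choisir l'arbre le moins vide (contenant le plus de fruits)."""
--     if len(arbres) == 1:
--         return [arbres[0] - 2]
--     if arbres[-1] == 1 or arbres[-1] == arbres[-2]:
--         keep, changed = arbres[:-2], [arbres[-2] - 1, arbres[-1] - 1]
--     else:
--         keep, changed = arbres[:-1], [arbres[-1] - 2]
--     out = []
--     for f in keep + changed: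
--         if f != 0:
--             _insort(out, f)
--     return out
-- ===== Notes on version B (the rewrite author's own statement) =====
-- stated objective: alternative
-- what changed: B replaces A's filter-generator-plus-builtin-sorted with a single pass that inserts each nonzero count into its sorted position via a recursive sorted-insert helper.
import Mathlib
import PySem

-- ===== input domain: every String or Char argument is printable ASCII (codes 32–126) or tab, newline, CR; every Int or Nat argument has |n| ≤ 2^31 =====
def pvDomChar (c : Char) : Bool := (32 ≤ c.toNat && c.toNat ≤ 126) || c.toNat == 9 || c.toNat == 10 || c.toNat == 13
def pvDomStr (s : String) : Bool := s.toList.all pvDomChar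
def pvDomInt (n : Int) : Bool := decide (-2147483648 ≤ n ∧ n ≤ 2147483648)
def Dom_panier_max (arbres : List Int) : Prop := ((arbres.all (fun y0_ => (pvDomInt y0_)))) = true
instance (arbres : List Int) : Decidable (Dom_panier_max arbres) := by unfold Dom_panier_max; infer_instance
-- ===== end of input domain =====

-- B replaces A's filter-then-builtin-sorted with one pass that sorted-inserts each
-- nonzero count (alternative decomposition, not claimed faster).

-- ===== PORT A =====
def panier_max (arbres : List Int) : List Int :=
  if arbres.length == 1 then
    [(PySem.List.pyGet? arbres 0).getD 0 - 2]
  else if ((PySem.List.pyGet? arbres (-1)).getD 0 == 1)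
       || ((PySem.List.pyGet? arbres (-1)).getD 0 == (PySem.List.pyGet? arbres (-2)).getD 0) then
    PySem.List.sorted
      ((PySem.List.slice arbres none (some (-2))
          ++ [(PySem.List.pyGet? arbres (-2)).getD 0 - 1]
          ++ [(PySem.List.pyGet? arbres (-1)).getD 0 - 1]).filter (fun fruits => !(fruits == 0)))
      (fun x => x) false
  else
    PySem.List.sorted
      ((PySem.List.slice arbres none (some (-1))
          ++ [(PySem.List.pyGet? arbres (-1)).getD 0 - 2]).filter (fun fruits => !(fruits == 0)))
      (fun x => x) false

-- ===== PORT B =====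
-- _insort from Source B: scan past the elements ≤ f, insert f there (structural form of the scan-and-insert loop)
def pvInsort (out : List Int) (f : Int) : List Int :=
  match out with
  | [] => [f]
  | y :: ys => if y ≤ f then y :: pvInsort ys f else f :: y :: ys

-- loop body of B: skip zero counts, sorted-insert the rest
def pvStep : List Int → Int → List Int := fun out f => if f != 0 then pvInsort out f else out

def panier_max_alt (arbres : List Int) : List Int :=
  if arbres.length == 1 then
    [(PySem.List.pyGet? arbres 0).getD 0 - 2]
  else
    let last := (PySem.List.pyGet? arbres (-1)).getD 0
    let snd := (PySem.List.pyGet? arbres (-2)).getD 0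
    let kc :=
      if last == 1 || last == snd then
        (PySem.List.slice arbres none (some (-2)), [snd - 1, last - 1])
      else
        (PySem.List.slice arbres none (some (-1)), [last - 2])
    (kc.1 ++ kc.2).foldl pvStep []

-- ===== PRECONDITION & SPEC =====
-- A raises IndexError on the empty list (arbres[-1]); that is the only exclusion.
def Pre_panier_max (arbres : List Int) : Prop := arbres ≠ []
instance (arbres : List Int) : Decidable (Pre_panier_max arbres) := by unfold Pre_panier_max; infer_instance
def pvWitness_panier_max : List Int := [3, 4]

def Spec_panier_max (arbres : List Int) (out : List Int) : Prop := out = panier_max_alt arbres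
instance (arbres : List Int) (out : List Int) : Decidable (Spec_panier_max arbres out) := by unfold Spec_panier_max; infer_instance

-- ===== CLAIM (what is proved, stated in full; the proofs are below) =====
def Claim_equal_panier_max : Prop := ∀ (arbres : List Int), Dom_panier_max arbres → Pre_panier_max arbres → Spec_panier_max arbres (panier_max arbres)

-- ===== LEMMAS AND PROOFS =====

theorem pvInsort_perm (out : List Int) (f : Int) : (pvInsort out f).Perm (f :: out) := by
  induction out with
  | nil => simp [pvInsort]
  | cons y ys ih =>
    simp only [pvInsort]
    split
    · exact ((ih.cons y).trans (List.Perm.swap f y ys))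
    · exact List.Perm.refl _

theorem pvInsort_pairwise (out : List Int) (f : Int)
    (h : out.Pairwise (· ≤ ·)) : (pvInsort out f).Pairwise (· ≤ ·) := by
  induction out with
  | nil => simp [pvInsort]
  | cons y ys ih =>
    rcases List.pairwise_cons.mp h with ⟨hy, hys⟩
    simp only [pvInsort]
    split
    · rename_i hyf
      refine List.pairwise_cons.mpr ⟨?_, ih hys⟩
      intro z hz
      rcases List.mem_cons.mp ((pvInsort_perm ys f).mem_iff.mp hz) with rfl | hz
      · exact hyf
      · exact hy z hz
    · rename_i hyf
      refine List.pairwise_cons.mpr ⟨?_, h⟩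
      intro z hz
      rcases List.mem_cons.mp hz with rfl | hz
      · exact le_of_not_ge hyf
      · exact le_trans (le_of_not_ge hyf) (hy z hz)

theorem pvFold_perm (l : List Int) (acc : List Int) :
    (l.foldl pvStep acc).Perm (acc ++ l.filter (fun f => !(f == 0))) := by
  induction l generalizing acc with
  | nil => simp
  | cons x xs ih =>
    simp only [List.foldl_cons, List.filter_cons]
    by_cases hx : x = 0
    · simpa [pvStep, hx] using ih acc
    · have h1 := ih (pvInsort acc x)
      have h2 : (pvInsort acc x ++ xs.filter (fun f => !(f == 0))).Perm
          (acc ++ (x :: xs.filter (fun f => !(f == 0)))) :=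
        ((pvInsort_perm acc x).append_right _).trans (List.perm_middle).symm
      have h3 := h1.trans h2
      simp only [pvStep, hx, if_pos, bne_iff_ne, ne_eq, not_false_iff]
      simpa [hx] using h3
  
theorem pvFold_pairwise (l : List Int) (acc : List Int)
    (h : acc.Pairwise (· ≤ ·)) : (l.foldl pvStep acc).Pairwise (· ≤ ·) := by
  induction l generalizing acc with
  | nil => simpa
  | cons x xs ih =>
    simp only [List.foldl_cons]
    by_cases hx : x = 0
    · simpa [pvStep, hx] using ih acc h
    · simpa [pvStep, hx] using ih (pvInsort acc x) (pvInsort_pairwise acc x h)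

theorem pvSorted_eq_fold (l : List Int) :
    PySem.List.sorted (l.filter (fun f => !(f == 0))) (fun x => x) false =
      l.foldl pvStep [] := by
  apply PySem.List.sorted_id_eq_of_perm_of_pairwise
  · simpa using pvFold_perm l []
  · exact pvFold_pairwise l [] (by simp)

-- ===== VERDICT (by name: the statement is the Claim_ definition above) =====
theorem panier_max_spec : Claim_equal_panier_max := by
  intro arbres _ hpre
  unfold Spec_panier_max panier_max panier_max_alt
  by_cases h1 : (arbres.length == 1) = true
  · simp only [h1, if_true]
  · simp only [h1, Bool.false_eq_true, if_false]
    by_cases hc : (((PySem.List.pyGet? arbres (-1)).getD 0 == 1)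
       || ((PySem.List.pyGet? arbres (-1)).getD 0 == (PySem.List.pyGet? arbres (-2)).getD 0)) = true
    · simp only [hc, if_true, List.append_assoc, List.singleton_append]
      exact pvSorted_eq_fold _
    · simp only [hc, Bool.false_eq_true, if_false]
      exact pvSorted_eq_fold _
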